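-- pv_equiv track=rewrite | github.com/TreverArnold/code-challenges | python/popping_blocks.py | pop_blocks
-- ===== SOURCE A (Python) =====
-- def pop_blocks(lst):
--     i = 0
--     while i < len(lst) - 1:
--         if lst[i] == lst[i + 1]:
--             j = i + 1
--             while j < len(lst) and lst[i] == lst[j]:
--                 j += 1
--             del lst[i:j]
--             pop_blocks(lst)
--         i += 1
--     return lst
-- ===== SOURCE B (Python) =====
-- def pop_blocks(lst):
--     # Single pass with a stack of (value, count) runs; a finished run of
--     # length >= 2 is dropped when a different value arrives (or at the end),
--     # letting its neighbours merge.  Note: entries below the top always have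
--     # count 1 (a push only ever happens onto a count-1 top), so at most one
--     # pop is needed per element.  Unlike A, this does not mutate lst.
--     stack = []
--     for x in lst:
--         if stack and stack[-1][0] != x and stack[-1][1] >= 2:
--             stack.pop()
--         if stack and stack[-1][0] == x:
--             stack[-1] = (x, stack[-1][1] + 1)
--         else:
--             stack.append((x, 1))
--     if stack and stack[-1][1] >= 2:
--         stack.pop()
--     return [v for v, c in stack for _ in range(c)]
-- ===== Notes on version B (the rewrite author's own statement) =====
-- stated objective: faster
-- what changed: A repeatedly deletes the leftmost adjacent-equal run from the list and recursively restarts the whole scan; B does one left-to-right pass keeping a stack of (value,count) runs, dropping a finished run of length >= 2 when a different value arrives (or at the end) so neighbours merge, and never rescans.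
import Mathlib
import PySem

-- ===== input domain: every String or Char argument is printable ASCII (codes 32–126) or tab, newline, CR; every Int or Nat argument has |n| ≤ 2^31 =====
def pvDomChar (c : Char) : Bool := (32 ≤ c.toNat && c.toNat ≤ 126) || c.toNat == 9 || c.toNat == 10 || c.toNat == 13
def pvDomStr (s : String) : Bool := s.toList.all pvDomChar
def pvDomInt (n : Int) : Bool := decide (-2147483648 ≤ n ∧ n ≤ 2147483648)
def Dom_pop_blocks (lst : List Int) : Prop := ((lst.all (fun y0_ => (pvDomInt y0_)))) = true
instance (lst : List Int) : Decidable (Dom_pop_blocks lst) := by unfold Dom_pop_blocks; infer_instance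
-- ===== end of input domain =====

-- B replaces A's delete-and-recurse rescans by a single pass with a stack of (value,count) runs.
-- A mutates its argument in place (del lst[i:j]); the equivalence proved here is about the return value only.

-- ===== PORT A =====
-- inner 'while j < len(lst) and lst[i] == lst[j]: j += 1' (v = lst[i], unchanged during the scan)
def scanA (lst : List Int) (v : Int) (j : Nat) : Nat :=
  if h : j < lst.length then
    if lst[j] = v then scanA lst v (j + 1) else j
  else j
termination_by lst.length - j
decreasing_by exact Nat.sub_succ_lt_self lst.length j h

-- these facts are cited by loopA's termination proof, so they stay above it
theorem scanA_ge (lst : List Int) (v : Int) (j : Nat) : j ≤ scanA lst v j := by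
  fun_induction scanA with
  | case1 j h hv ih => exact Nat.le_of_succ_le ih
  | case2 j h hv => exact Nat.le_refl j
  | case3 j h => exact Nat.le_refl j

theorem scanA_le (lst : List Int) (v : Int) (j : Nat) (hj : j ≤ lst.length) :
    scanA lst v j ≤ lst.length := by
  fun_induction scanA with
  | case1 j h hv ih => exact ih (Nat.succ_le_of_lt h)
  | case2 j h hv => exact Nat.le_of_lt h
  | case3 j h => exact hj

theorem scanA_ge_two (lst : List Int) (v : Int) (i : Nat) (h : i + 1 < lst.length)
    (hv : lst[i + 1] = v) : i + 2 ≤ scanA lst v (i + 1) := by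
  rw [scanA]
  rw [dif_pos h, if_pos hv]
  exact scanA_ge lst v (i + 2)

theorem del_len_lt (lst : List Int) (i j : Nat) (h1 : i + 1 < lst.length) (h2 : i + 2 ≤ j)
    (h3 : j ≤ lst.length) : (lst.take i ++ lst.drop j).length < lst.length := by
  rw [List.length_append, List.length_take, List.length_drop]
  omega

-- outer while loop; the result carries its length bound so the recursion is well-founded
def loopA (lst : List Int) (i : Nat) : {r : List Int // r.length ≤ lst.length} :=
  if h : i + 1 < lst.length then
    if heq : lst[i]'(Nat.lt_of_succ_lt h) = lst[i + 1]'h then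
      let j := scanA lst (lst[i]'(Nat.lt_of_succ_lt h)) (i + 1)
      have hj2 : i + 2 ≤ j := scanA_ge_two lst (lst[i]'(Nat.lt_of_succ_lt h)) i h heq.symm
      have hjl : j ≤ lst.length := scanA_le lst (lst[i]'(Nat.lt_of_succ_lt h)) (i + 1) (Nat.le_of_lt h)
      have hlt : (lst.take i ++ lst.drop j).length < lst.length := del_len_lt lst i j h hj2 hjl
      let r1 := loopA (lst.take i ++ lst.drop j) 0   -- del lst[i:j]; recursive pop_blocks(lst)
      let r2 := loopA r1.val (i + 1)
      ⟨r2.val, le_trans r2.property (le_trans r1.property (le_of_lt hlt))⟩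
    else
      ⟨(loopA lst (i + 1)).val, (loopA lst (i + 1)).property⟩
  else ⟨lst, Nat.le_refl _⟩
termination_by (lst.length, lst.length - i)
decreasing_by
  · exact Prod.Lex.left _ _ hlt
  · exact Prod.Lex.left _ _ (lt_of_le_of_lt r1.property hlt)
  · exact Prod.Lex.right lst.length (Nat.sub_succ_lt_self lst.length i (Nat.lt_of_succ_lt h))

def pop_blocks (lst : List Int) : List Int := (loopA lst 0).val

-- ===== PORT B =====
-- one step of Source B's loop body; the stack is kept top-at-head
def pushB (st : List (Int × Int)) (x : Int) : List (Int × Int) :=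
  let st1 := match st with
    | (v, c) :: rest => if v ≠ x ∧ 2 ≤ c then rest else st
    | [] => st
  match st1 with
  | (v, c) :: rest => if v = x then (v, c + 1) :: rest else (x, 1) :: (v, c) :: rest
  | [] => [(x, 1)]

def pop_blocks_alt (lst : List Int) : List Int :=
  let st := lst.foldl pushB []
  let st2 := match st with
    | (_, c) :: rest => if 2 ≤ c then rest else st
    | [] => st
  st2.reverse.flatMap (fun p => List.replicate p.2.toNat p.1)

-- ===== PRECONDITION & SPEC =====
def Spec_pop_blocks (lst : List Int) (out : List Int) : Prop := out = pop_blocks_alt lst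
instance (lst : List Int) (out : List Int) : Decidable (Spec_pop_blocks lst out) := by unfold Spec_pop_blocks; infer_instance

-- ===== CLAIM (what is proved, stated in full; the proofs are below) =====
def Claim_equal_pop_blocks : Prop := ∀ (lst : List Int), Dom_pop_blocks lst → Spec_pop_blocks lst (pop_blocks lst)

-- ===== LEMMAS AND PROOFS =====

-- "no two adjacent elements are equal"
def NoAdj : List Int → Prop
  | a :: b :: t => a ≠ b ∧ NoAdj (b :: t)
  | _ => True

theorem noAdj_getElem : ∀ (l : List Int), NoAdj l → ∀ (k : Nat) (h : k + 1 < l.length),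
    l[k]'(by omega) ≠ l[k + 1]'h := by
  intro l
  induction l with
  | nil => intro _ k h; simp at h
  | cons a t ih =>
    intro hna k h
    cases t with
    | nil => simp at h
    | cons b t' =>
      obtain ⟨hab, ht⟩ := hna
      cases k with
      | zero => simpa using hab
      | succ k' =>
        have := ih ht k' (by simpa using h)
        simpa using this

theorem noAdj_of_getElem : ∀ (l : List Int),
    (∀ (k : Nat) (h : k + 1 < l.length), l[k]'(by omega) ≠ l[k + 1]'h) → NoAdj l := by
  intro l
  induction l with
  | nil => intro _; trivial
  | cons a t ih =>
    intro h
    cases t with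
    | nil => trivial
    | cons b t' =>
      refine ⟨by simpa using h 0 (by simp), ih ?_⟩
      intro k hk
      have := h (k + 1) (by simpa using hk)
      simpa using this

theorem noAdj_reverse (l : List Int) (h : NoAdj l) : NoAdj l.reverse := by
  apply noAdj_of_getElem
  intro k hk
  rw [List.getElem_reverse, List.getElem_reverse]
  have h2 := noAdj_getElem l h (l.length - 1 - (k + 1))
      (by simp at hk; omega)
  have hidx : l.length - 1 - (k + 1) + 1 = l.length - 1 - k := by simp at hk; omega
  simp only [hidx] at h2
  exact fun he => h2 he.symm

-- reduction lemmas for one push step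
theorem pushB_nil (x : Int) : pushB [] x = [(x, 1)] := rfl

theorem pushB_pop (v c x : Int) (rest : List (Int × Int)) (hpop : v ≠ x ∧ 2 ≤ c) :
    pushB ((v, c) :: rest) x = (match rest with
      | (w, d) :: r' => if w = x then (w, d + 1) :: r' else (x, 1) :: (w, d) :: r'
      | [] => [(x, 1)]) := by
  unfold pushB
  simp only [if_pos hpop]

theorem pushB_pop_cons (v c x w d : Int) (r' : List (Int × Int)) (hpop : v ≠ x ∧ 2 ≤ c) :
    pushB ((v, c) :: (w, d) :: r') x
      = (if w = x then (w, d + 1) :: r' else (x, 1) :: (w, d) :: r') := by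
  unfold pushB
  simp only [if_pos hpop]

theorem pushB_merge (v c x : Int) (rest : List (Int × Int)) (hpop : ¬(v ≠ x ∧ 2 ≤ c))
    (hvx : v = x) : pushB ((v, c) :: rest) x = (v, c + 1) :: rest := by
  unfold pushB
  simp only [if_neg hpop, if_pos hvx]

theorem pushB_push (v c x : Int) (rest : List (Int × Int)) (hpop : ¬(v ≠ x ∧ 2 ≤ c))
    (hvx : ¬ v = x) : pushB ((v, c) :: rest) x = (x, 1) :: (v, c) :: rest := by
  unfold pushB
  simp only [if_neg hpop, if_neg hvx]

-- stack invariants: adjacent values differ, counts positive, non-top counts are 1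
def DistinctAdj : List (Int × Int) → Prop
  | p :: q :: t => p.1 ≠ q.1 ∧ DistinctAdj (q :: t)
  | _ => True

def Good (st : List (Int × Int)) : Prop :=
  DistinctAdj st ∧ (∀ p ∈ st, 1 ≤ p.2) ∧ (∀ p ∈ st.tail, p.2 = 1)

theorem good_nil : Good [] := ⟨trivial, by simp, by simp⟩

theorem distinctAdj_tail (p : Int × Int) (t : List (Int × Int)) (h : DistinctAdj (p :: t)) :
    DistinctAdj t := by
  cases t with
  | nil => trivial
  | cons q t' => exact h.2

theorem distinctAdj_cons_of_ne (x : Int × Int) (q : Int × Int) (t : List (Int × Int))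
    (hne : x.1 ≠ q.1) (h : DistinctAdj (q :: t)) : DistinctAdj (x :: q :: t) := ⟨hne, h⟩

theorem distinctAdj_cons_same (v c c' : Int) (t : List (Int × Int))
    (h : DistinctAdj ((v, c) :: t)) : DistinctAdj ((v, c') :: t) := by
  cases t with
  | nil => trivial
  | cons q t' => exact ⟨h.1, h.2⟩

theorem pushB_good (st : List (Int × Int)) (x : Int) (h : Good st) : Good (pushB st x) := by
  obtain ⟨hd, hp, ht⟩ := h
  cases st with
  | nil => exact ⟨trivial, by simp [pushB_nil], by simp [pushB_nil]⟩
  | cons p rest =>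
    obtain ⟨v, c⟩ := p
    by_cases hpop : v ≠ x ∧ 2 ≤ c
    · rw [pushB_pop v c x rest hpop]
      cases rest with
      | nil => exact ⟨trivial, by simp, by simp⟩
      | cons q r' =>
        obtain ⟨w, d⟩ := q
        have hd1 : d = 1 := ht (w, d) (by simp)
        have hr1 : ∀ p ∈ r', p.2 = 1 := fun p hp' => ht p (by simp [hp'])
        have hdr : DistinctAdj ((w, d) :: r') := distinctAdj_tail _ _ hd
        by_cases hwx : w = x
        · simp only [if_pos hwx]
          refine ⟨distinctAdj_cons_same w d (d + 1) r' hdr, ?_, ?_⟩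
          · intro p hp'
            rcases List.mem_cons.mp hp' with h1 | h2
            · subst h1; simp; omega
            · have := hr1 p h2; omega
          · intro p hp'; exact hr1 p hp'
        · simp only [if_neg hwx]
          refine ⟨distinctAdj_cons_of_ne _ _ _ (fun he => hwx he.symm) hdr, ?_, ?_⟩
          · intro p hp'
            rcases List.mem_cons.mp hp' with h1 | h2
            · subst h1; simp
            · rcases List.mem_cons.mp h2 with h3 | h4
              · subst h3; simp [hd1]
              · have := hr1 p h4; omega
          · intro p hp'
            rcases List.mem_cons.mp hp' with h1 | h2
            · subst h1; simpa using hd1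
            · exact hr1 p h2
    · by_cases hvx : v = x
      · rw [pushB_merge v c x rest hpop hvx]
        refine ⟨distinctAdj_cons_same v c (c + 1) rest hd, ?_, ?_⟩
        · intro p hp'
          rcases List.mem_cons.mp hp' with h1 | h2
          · subst h1; have := hp (v, c) (by simp); simp at this ⊢; omega
          · exact hp p (by simp [h2])
        · intro p hp'; exact ht p hp'
      · rw [pushB_push v c x rest hpop hvx]
        have hc1 : c = 1 := by
          have := hp (v, c) (by simp)
          simp at this
          by_cases h2c : 2 ≤ c
          · exact absurd ⟨hvx, h2c⟩ hpop
          · omega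
        refine ⟨distinctAdj_cons_of_ne _ _ _ (fun he => hvx he.symm) hd, ?_, ?_⟩
        · intro p hp'
          rcases List.mem_cons.mp hp' with h1 | h2
          · subst h1; simp
          · exact hp p h2
        · intro p hp'
          rcases List.mem_cons.mp hp' with h1 | h2
          · subst h1; simp [hc1]
          · exact ht p h2

theorem good_foldl (l : List Int) : ∀ (st : List (Int × Int)), Good st →
    Good (List.foldl pushB st l) := by
  induction l with
  | nil => intro st h; simpa using h
  | cons x l' ih => intro st h; exact ih _ (pushB_good st x h)

-- proof-side views of pop_blocks_alt's pieces
def fin2 (st : List (Int × Int)) : List (Int × Int) :=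
  match st with
  | (_, c) :: rest => if 2 ≤ c then rest else st
  | [] => []

def flat (st : List (Int × Int)) : List Int :=
  st.reverse.flatMap (fun p => List.replicate p.2.toNat p.1)

theorem alt_eq (lst : List Int) :
    pop_blocks_alt lst = flat (fin2 (lst.foldl pushB [])) := by
  unfold pop_blocks_alt flat fin2
  cases h : lst.foldl pushB [] with
  | nil => simp
  | cons p rest => obtain ⟨v, c⟩ := p; by_cases h2 : 2 ≤ c <;> simp [h2]

theorem flat_ones : ∀ (st : List (Int × Int)), (∀ p ∈ st, p.2 = 1) →
    flat st = (st.map Prod.fst).reverse := by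
  intro st
  induction st with
  | nil => intro _; rfl
  | cons p t ih =>
    intro h
    obtain ⟨v, c⟩ := p
    have hc : c = 1 := by simpa using h (v, c) (by simp)
    subst hc
    unfold flat at ih ⊢
    simp [ih (fun q hq => h q (by simp [hq]))]

theorem distinctAdj_map_fst : ∀ (st : List (Int × Int)), DistinctAdj st →
    NoAdj (st.map Prod.fst) := by
  intro st
  induction st with
  | nil => intro _; trivial
  | cons p t ih =>
    intro h
    cases t with
    | nil => trivial
    | cons q t' => exact ⟨h.1, ih h.2⟩

theorem noAdj_flat_fin2 (st : List (Int × Int)) (h : Good st) : NoAdj (flat (fin2 st)) := by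
  obtain ⟨hd, hp, ht⟩ := h
  have key : ∀ (st2 : List (Int × Int)), DistinctAdj st2 → (∀ p ∈ st2, p.2 = 1) →
      NoAdj (flat st2) := by
    intro st2 h1 h2
    rw [flat_ones st2 h2]
    exact noAdj_reverse _ (distinctAdj_map_fst st2 h1)
  unfold fin2
  cases st with
  | nil => trivial
  | cons p rest =>
    obtain ⟨v, c⟩ := p
    by_cases h2 : 2 ≤ c
    · simp only [if_pos h2]
      exact key rest (distinctAdj_tail _ _ hd) ht
    · simp only [if_neg h2]
      refine key _ hd ?_
      intro p hp'
      rcases List.mem_cons.mp hp' with h1 | h3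
      · subst h1
        have := hp (v, c) (by simp)
        simp at this ⊢
        omega
      · exact ht p h3

theorem noAdj_alt (lst : List Int) : NoAdj (pop_blocks_alt lst) := by
  rw [alt_eq]
  exact noAdj_flat_fin2 _ (good_foldl lst [] good_nil)

-- the stack after a list with no adjacent equals is just that list, counts 1, reversed
theorem S_aux : ∀ (u : List Int) (v : Int) (st : List (Int × Int)), NoAdj (v :: u) →
    List.foldl pushB ((v, 1) :: st) u
      = ((v :: u).map (fun x => (x, (1 : Int)))).reverse ++ st := by
  intro u
  induction u with
  | nil => intro v st _; simp
  | cons b u' ih =>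
    intro v st h
    obtain ⟨hvb, hb⟩ := h
    have hpush : pushB ((v, 1) :: st) b = (b, 1) :: (v, 1) :: st :=
      pushB_push v 1 b st (by intro h'; omega) hvb
    simp only [List.foldl_cons, hpush]
    rw [ih b ((v, 1) :: st) hb]
    simp

theorem S_spec (u : List Int) (h : NoAdj u) :
    List.foldl pushB [] u = (u.map (fun x => (x, (1 : Int)))).reverse := by
  cases u with
  | nil => rfl
  | cons v u' =>
    have h0 : List.foldl pushB [] (v :: u') = List.foldl pushB ((v, 1) :: []) u' := by
      simp [pushB_nil]
    rw [h0, S_aux u' v [] h]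
    simp

theorem B0 (u : List Int) (h : NoAdj u) : pop_blocks_alt u = u := by
  rw [alt_eq, S_spec u h]
  have hones : ∀ p ∈ (u.map (fun x => (x, (1 : Int)))).reverse, p.2 = 1 := by
    intro p hp
    simp at hp
    obtain ⟨a, _, rfl⟩ := hp
    rfl
  have hfe : fin2 ((u.map (fun x => (x, (1 : Int)))).reverse)
      = (u.map (fun x => (x, (1 : Int)))).reverse := by
    unfold fin2
    cases hc : (u.map (fun x => (x, (1 : Int)))).reverse with
    | nil => rfl
    | cons p rest =>
      obtain ⟨v, c⟩ := p
      have : c = 1 := by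
        have := hones (v, c) (by rw [hc]; simp)
        simpa using this
      subst this
      norm_num
  rw [hfe, flat_ones _ hones]
  simp [Function.comp_def]

-- pushing a run of k copies of a onto a stack whose top (if any) is (w,1), w ≠ a
theorem run_lemma : ∀ (k : Nat) (st : List (Int × Int)) (a : Int), 1 ≤ k →
    (st = [] ∨ ∃ w t, st = (w, (1 : Int)) :: t ∧ w ≠ a) →
    List.foldl pushB st (List.replicate k a) = (a, (k : Int)) :: st := by
  intro k
  induction k with
  | zero => intro st a h; omega
  | succ k' ih =>
    intro st a _ hst
    by_cases hk : 1 ≤ k'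
    · rw [List.replicate_succ', List.foldl_append, ih st a hk hst]
      simp only [List.foldl_cons, List.foldl_nil]
      rw [pushB_merge a (k' : Int) a st (by simp) rfl]
      norm_num
    · have hk0 : k' = 0 := by omega
      subst hk0
      simp only [List.replicate_succ, List.replicate_zero, List.foldl_cons, List.foldl_nil]
      rcases hst with rfl | ⟨w, t, rfl, hwa⟩
      · rfl
      · rw [pushB_push w 1 a t (by intro h'; omega) (fun he => hwa he)]
        norm_num

-- a differing element pops a finished (count ≥ 2) run off the top
theorem skip_top (a b : Int) (c : Int) (st : List (Int × Int)) (hba : b ≠ a) (hc : 2 ≤ c)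
    (hst : st = [] ∨ ∃ w t, st = (w, (1 : Int)) :: t) :
    pushB ((a, c) :: st) b = pushB st b := by
  rcases hst with rfl | ⟨w, t, rfl⟩
  · rw [pushB_pop a c b [] ⟨fun he => hba he.symm, hc⟩]
    simp [pushB_nil]
  · rw [pushB_pop_cons a c b w 1 t ⟨fun he => hba he.symm, hc⟩]
    by_cases hwb : w = b
    · rw [if_pos hwb, pushB_merge w 1 b t (by intro h'; omega) hwb]
    · rw [if_neg hwb, pushB_push w 1 b t (by intro h'; omega) hwb]

-- the key confluence step: a maximal interior run of length ≥ 2 vanishes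
theorem L1 (u v : List Int) (a : Int) (k : Nat) (hu : NoAdj u)
    (hlast : u.getLast? ≠ some a) (hhead : v.head? ≠ some a) (hk : 2 ≤ k) :
    pop_blocks_alt (u ++ List.replicate k a ++ v) = pop_blocks_alt (u ++ v) := by
  have hSu : List.foldl pushB [] u = (u.map (fun x => (x, (1 : Int)))).reverse := S_spec u hu
  have hshape : (u.map (fun x => (x, (1 : Int)))).reverse = [] ∨
      ∃ w t, (u.map (fun x => (x, (1 : Int)))).reverse = (w, (1 : Int)) :: t ∧ w ≠ a := by
    rcases List.eq_nil_or_concat u with rfl | ⟨u', w, rfl⟩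
    · left; rfl
    · right
      refine ⟨w, (u'.map (fun x => (x, (1 : Int)))).reverse, by simp, ?_⟩
      intro he
      apply hlast
      rw [List.concat_eq_append, List.getLast?_concat, he]
  have hrun : List.foldl pushB [] (u ++ List.replicate k a)
      = (a, (k : Int)) :: (u.map (fun x => (x, (1 : Int)))).reverse := by
    rw [List.foldl_append, hSu]
    exact run_lemma k _ a (by omega) hshape
  cases v with
  | nil =>
    simp only [List.append_nil]
    rw [alt_eq, hrun, B0 u hu]
    have hones : ∀ p ∈ (u.map (fun x => (x, (1 : Int)))).reverse, p.2 = 1 := by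
      intro p hp
      simp at hp
      obtain ⟨x, _, rfl⟩ := hp
      rfl
    unfold fin2
    have hk2 : (2 : Int) ≤ (k : Int) := by exact_mod_cast hk
    simp only [if_pos hk2]
    rw [flat_ones _ hones]
    simp [Function.comp_def]
  | cons b v' =>
    have hba : b ≠ a := by intro he; apply hhead; rw [he]; rfl
    have hstacks : List.foldl pushB [] (u ++ List.replicate k a ++ (b :: v'))
        = List.foldl pushB [] (u ++ (b :: v')) := by
      rw [List.foldl_append, hrun, List.foldl_append, hSu]
      simp only [List.foldl_cons]
      congr 1
      apply skip_top a b _ _ hba (by exact_mod_cast hk)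
      rcases hshape with h1 | ⟨w, t, h2, _⟩
      · left; exact h1
      · right; exact ⟨w, t, h2⟩
    rw [alt_eq, alt_eq, hstacks]

-- the outer loop does nothing on a list with no adjacent equals
theorem M2 (lst : List Int) (i : Nat) (h : NoAdj lst) : (loopA lst i).val = lst := by
  fun_induction loopA lst i with
  | case1 lst i h1 heq j hj2 hjl hlt r1 r2 ih1 ih2 =>
    exact absurd heq (noAdj_getElem lst h i h1)
  | case2 lst i h1 heq ih => exact ih h
  | case3 lst i h1 => rfl

-- everything the scan passed over equals v
theorem scanA_run (lst : List Int) (v : Int) (j : Nat) :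
    ∀ m, j ≤ m → m < scanA lst v j → ∃ h : m < lst.length, lst[m] = v := by
  fun_induction scanA lst v j with
  | case1 j h hv ih =>
    intro m hm1 hm2
    by_cases hmj : m = j
    · subst hmj; exact ⟨h, hv⟩
    · exact ih m (by omega) hm2
  | case2 j h hv => intro m hm1 hm2; omega
  | case3 j h => intro m hm1 hm2; omega

theorem scanA_stop (lst : List Int) (v : Int) (j : Nat) (hj : j ≤ lst.length) :
    scanA lst v j = lst.length ∨ ∃ h : scanA lst v j < lst.length, lst[scanA lst v j] ≠ v := by
  fun_induction scanA lst v j with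
  | case1 j h hv ih => exact ih (by omega)
  | case2 j h hv => right; exact ⟨h, hv⟩
  | case3 j h => left; omega

theorem decomp (lst : List Int) (i j : Nat) (a : Int) (hij : i ≤ j) (hjl : j ≤ lst.length)
    (h : ∀ m (hm : m < lst.length), i ≤ m → m < j → lst[m] = a) :
    lst = lst.take i ++ List.replicate (j - i) a ++ lst.drop j := by
  apply List.ext_getElem
  · simp; omega
  · intro n h1 h2
    simp only [List.getElem_append, List.length_append, List.length_take,
      List.length_replicate]
    split
    · split
      · rw [List.getElem_take]
      · rename_i hn1 hn2
        rw [List.getElem_replicate]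
        have hn : i ≤ n := by omega
        exact h n h1 hn (by omega)
    · rename_i hn1
      rw [List.getElem_drop]
      congr 1
      omega

-- main loop invariant: once all pairs before i are distinct, the loop computes B's value
theorem mainA (lst : List Int) (i : Nat) :
    (∀ (k : Nat) (h : k + 1 < lst.length), k < i → lst[k]'(by omega) ≠ lst[k + 1]'h) →
    (loopA lst i).val = pop_blocks_alt lst := by
  fun_induction loopA lst i with
  | case1 lst i h1 heq j hj2 hjl hlt r1 r2 ih1 ih2 =>
    intro hyp
    show r2.val = pop_blocks_alt lst
    have e1 : r1.val = pop_blocks_alt (List.take i lst ++ List.drop j lst) :=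
      ih1 (by intro k hk hk0; omega)
    have hna : NoAdj r1.val := by rw [e1]; exact noAdj_alt _
    have e2 : r2.val = r1.val := M2 r1.val (i + 1) hna
    rw [e2, e1]
    have hrun : ∀ m (hm : m < lst.length), i ≤ m → m < j → lst[m] = lst[i] := by
      intro m hm him hmj
      by_cases hmi : m = i
      · subst hmi; rfl
      · obtain ⟨h', he⟩ := scanA_run lst lst[i] (i + 1) m (by omega) hmj
        exact he
    have hdec := decomp lst i j lst[i] (by omega) hjl hrun
    have hL1 : pop_blocks_alt (List.take i lst ++ List.replicate (j - i) lst[i] ++ List.drop j lst)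
        = pop_blocks_alt (List.take i lst ++ List.drop j lst) := by
      apply L1
      · apply noAdj_of_getElem
        intro k hk
        have hki : k + 1 < i := by
          have := hk
          simp at this
          omega
        have hklen : k + 1 < lst.length := by omega
        have := hyp k hklen (by omega)
        simpa [List.getElem_take] using this
      · by_cases hi0 : i = 0
        · subst hi0; simp
        · rw [List.getLast?_eq_getElem?]
          have hlen : (List.take i lst).length = i := by simp; omega
          rw [hlen, List.getElem?_take_of_lt (by omega : i - 1 < i),
            List.getElem?_eq_getElem (by omega : i - 1 < lst.length)]
          intro he
          have hne := hyp (i - 1) (by omega) (by omega)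
          apply hne
          have hidx : i - 1 + 1 = i := by omega
          simp only [hidx]
          simpa using he
      · rw [List.head?_drop]
        rcases scanA_stop lst lst[i] (i + 1) (by omega) with hstop | ⟨h', hne⟩
        · have : j = lst.length := hstop
          rw [List.getElem?_eq_none (by omega)]
          simp
        · rw [List.getElem?_eq_getElem h']
          intro he
          exact hne (by simpa using he)
      · omega
    rw [← hL1, ← hdec]
  | case2 lst i h1 heq ih =>
    intro hyp
    apply ih
    intro k hk hki
    by_cases hkilt : k < i
    · exact hyp k hk hkilt
    · have : k = i := by omega
      subst this
      exact heq
  | case3 lst i h1 =>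
    intro hyp
    have hna : NoAdj lst := by
      apply noAdj_of_getElem
      intro k hk
      exact hyp k hk (by omega)
    exact (B0 lst hna).symm

-- ===== VERDICT (by name: the statement is the Claim_ definition above) =====
theorem pop_blocks_spec : Claim_equal_pop_blocks := by
  intro lst _
  unfold Spec_pop_blocks pop_blocks
  exact mainA lst 0 (by intro k hk hki; omega)
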